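-- pv_equiv track=rewrite | github.com/TecVit/obi | neps/outros/anti-progressao.py | anti_progressao_n_esimo
-- ===== SOURCE A (Python) =====
-- def anti_progressao_n_esimo(N):
--   seq = [0]
--   usados = set(seq)
--   x = 1
--
--   while len(seq) < N:
--     eh_valido = True
--     for a in seq:
--       b = (x + a) // 2
--       if (x + a) % 2 == 0 and b in usados:
--         eh_valido = False
--         break
--     if eh_valido:
--       seq.append(x)
--       usados.add(x)
--     x += 1
--
--   return seq[-1]
-- ===== SOURCE B (Python) =====
-- def anti_progressao_n_esimo(N):
--   # Closed form: the greedy 3-AP-free sequence starting at 0 is the Stanley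
--   # sequence: its n-th term (0-indexed) is n written in binary, read in base 3.
--   if N <= 1:
--     return 0
--   n = N - 1
--   r, p = 0, 1
--   while n:
--     r += (n & 1) * p
--     n >>= 1
--     p *= 3
--   return r
-- ===== Notes on version B (the rewrite author's own statement) =====
-- stated objective: faster
-- what changed: Replaced the greedy quadratic sieve (test every candidate x against all previous terms) by the closed form: the N-th term is N-1 written in binary and read in base 3.
import Mathlib
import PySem

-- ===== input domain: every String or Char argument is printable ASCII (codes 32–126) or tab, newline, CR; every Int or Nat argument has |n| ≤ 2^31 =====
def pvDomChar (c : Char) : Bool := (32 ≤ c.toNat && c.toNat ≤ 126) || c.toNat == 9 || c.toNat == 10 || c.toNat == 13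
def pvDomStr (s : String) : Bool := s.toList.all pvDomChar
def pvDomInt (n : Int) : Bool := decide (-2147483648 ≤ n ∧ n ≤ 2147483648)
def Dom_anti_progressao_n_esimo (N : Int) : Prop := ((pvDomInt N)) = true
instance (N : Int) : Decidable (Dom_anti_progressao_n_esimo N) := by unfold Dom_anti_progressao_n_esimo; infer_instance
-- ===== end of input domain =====

-- B replaces A's greedy quadratic sieve by the closed form (N-1 written in
-- binary, read in base 3); a timing run reports whether it is faster.

-- ===== PORT A =====
-- inner 'for a in seq: … break' of A
def pvEhValido (x : Int) (usados : PySem.Set Int) : List Int → Bool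
  | [] => true
  | a :: rest =>
    if PySem.Int.mod (x + a) 2 == 0 && PySem.Set.contains usados (PySem.Int.floordiv (x + a) 2) then
      false
    else pvEhValido x usados rest

-- A's 'while len(seq) < N' loop; the fuel only makes the recursion total
-- (the proof shows 3 ^ N.toNat steps always suffice).
def pvLoopA (N : Int) : Nat → List Int → PySem.Set Int → Int → Int
  | 0, seq, _, _ => (PySem.List.pyGet? seq (-1)).getD 0
  | fuel + 1, seq, usados, x =>
    if (seq.length : Int) < N then
      if pvEhValido x usados seq then
        pvLoopA N fuel (seq ++ [x]) (PySem.Set.add usados x) (x + 1)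
      else
        pvLoopA N fuel seq usados (x + 1)
    else
      (PySem.List.pyGet? seq (-1)).getD 0

def anti_progressao_n_esimo (N : Int) : Int :=
  pvLoopA N (3 ^ N.toNat) [0] (PySem.Set.ofList [0]) 1

-- ===== PORT B =====
-- B's 'while n: r += (n & 1) * p; n >>= 1; p *= 3' loop
def pvBloop (n : Nat) (r p : Int) : Int :=
  if n = 0 then r else pvBloop (n / 2) (r + (n % 2 : Nat) * p) (p * 3)
termination_by n
decreasing_by exact Nat.div_lt_self (Nat.pos_of_ne_zero (by assumption)) (by norm_num)

def anti_progressao_n_esimo_alt (N : Int) : Int :=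
  if N ≤ 1 then 0 else pvBloop (N - 1).toNat 0 1

-- ===== PRECONDITION & SPEC =====
def Spec_anti_progressao_n_esimo (N : Int) (out : Int) : Prop := out = anti_progressao_n_esimo_alt N
instance (N : Int) (out : Int) : Decidable (Spec_anti_progressao_n_esimo N out) := by unfold Spec_anti_progressao_n_esimo; infer_instance

-- ===== CLAIM (what is proved, stated in full; the proofs are below) =====
def Claim_equal_anti_progressao_n_esimo : Prop := ∀ (N : Int), Dom_anti_progressao_n_esimo N → Spec_anti_progressao_n_esimo N (anti_progressao_n_esimo N)

-- ===== LEMMAS AND PROOFS =====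

-- the Stanley sequence: n written in binary, read in base 3
def pvSfun (n : Nat) : Nat :=
  if n = 0 then 0 else 3 * pvSfun (n / 2) + n % 2
termination_by n
decreasing_by exact Nat.div_lt_self (Nat.pos_of_ne_zero (by assumption)) (by norm_num)

-- membership in the Stanley set: every base-3 digit is 0 or 1
def pvIsC (n : Nat) : Bool :=
  if n = 0 then true else decide (n % 3 ≤ 1) && pvIsC (n / 3)
termination_by n
decreasing_by exact Nat.div_lt_self (Nat.pos_of_ne_zero (by assumption)) (by norm_num)

-- x with every base-3 digit 2 replaced by 0 / by 1
def pvG0 (n : Nat) : Nat :=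
  if n = 0 then 0 else 3 * pvG0 (n / 3) + (if n % 3 = 2 then 0 else n % 3)
termination_by n
decreasing_by exact Nat.div_lt_self (Nat.pos_of_ne_zero (by assumption)) (by norm_num)

def pvG1 (n : Nat) : Nat :=
  if n = 0 then 0 else 3 * pvG1 (n / 3) + (if n % 3 = 2 then 1 else n % 3)
termination_by n
decreasing_by exact Nat.div_lt_self (Nat.pos_of_ne_zero (by assumption)) (by norm_num)

lemma pvSfun_zero : pvSfun 0 = 0 := by simp [pvSfun]

lemma pvSfun_pos (n : Nat) (hn : n ≠ 0) : pvSfun n = 3 * pvSfun (n / 2) + n % 2 := by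
  rw [pvSfun]; simp [hn]

lemma pvIsC_zero : pvIsC 0 = true := by simp [pvIsC]

lemma pvIsC_pos (n : Nat) (hn : n ≠ 0) :
    pvIsC n = (decide (n % 3 ≤ 1) && pvIsC (n / 3)) := by
  rw [pvIsC]; simp [hn]

lemma pvIsC_iff (n : Nat) : pvIsC n = true ↔ (n = 0 ∨ (n % 3 ≤ 1 ∧ pvIsC (n / 3) = true)) := by
  by_cases hn : n = 0
  · simp [hn, pvIsC_zero]
  · rw [pvIsC_pos n hn]; simp [hn]

lemma pvSfun_mono : ∀ b a : Nat, a < b → pvSfun a < pvSfun b := by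
  intro b
  induction b using Nat.strong_induction_on with
  | _ b ih =>
    intro a hab
    have hb : b ≠ 0 := by omega
    rw [pvSfun_pos b hb]
    by_cases ha : a = 0
    · subst ha; rw [pvSfun_zero]
      by_cases h2 : b % 2 = 1
      · omega
      · have := ih (b / 2) (by omega) 0 (by omega)
        rw [pvSfun_zero] at this; omega
    · rw [pvSfun_pos a ha]
      by_cases hd : a / 2 = b / 2
      · rw [hd]; omega
      · have := ih (b / 2) (by omega) (a / 2) (by omega)
        omega

lemma pvSfun_isC (n : Nat) : pvIsC (pvSfun n) = true := by
  induction n using Nat.strong_induction_on with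
  | _ n ih =>
    by_cases hn : n = 0
    · rw [hn, pvSfun_zero]; exact pvIsC_zero
    · rw [pvSfun_pos n hn]
      have hq := ih (n / 2) (by omega)
      by_cases hz : 3 * pvSfun (n / 2) + n % 2 = 0
      · rw [hz]; exact pvIsC_zero
      · rw [pvIsC_pos _ hz]
        have hmod : (3 * pvSfun (n / 2) + n % 2) % 3 = n % 2 := by omega
        have hdiv : (3 * pvSfun (n / 2) + n % 2) / 3 = pvSfun (n / 2) := by omega
        rw [hmod, hdiv, hq]
        simp; omega

lemma pvSfun_surj : ∀ m : Nat, pvIsC m = true → ∃ k, pvSfun k = m := by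
  intro m
  induction m using Nat.strong_induction_on with
  | _ m ih =>
    intro hm
    by_cases h0 : m = 0
    · exact ⟨0, by rw [pvSfun_zero, h0]⟩
    · rcases (pvIsC_iff m).mp hm with h | ⟨hr, hq⟩
      · exact absurd h h0
      · obtain ⟨k', hk'⟩ := ih (m / 3) (by omega) hq
        refine ⟨2 * k' + m % 3, ?_⟩
        have hk0 : 2 * k' + m % 3 ≠ 0 := by
          intro h
          have h1 : k' = 0 := by omega
          rw [h1, pvSfun_zero] at hk'; omega
        rw [pvSfun_pos _ hk0]
        have h2 : (2 * k' + m % 3) / 2 = k' := by omega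
        have h3 : (2 * k' + m % 3) % 2 = m % 3 := by omega
        rw [h2, h3, hk']; omega

lemma pvIsC_parts (n : Nat) (h : pvIsC n = true) : n % 3 ≤ 1 ∧ pvIsC (n / 3) = true := by
  rcases (pvIsC_iff n).mp h with h0 | h1
  · subst h0; exact ⟨by omega, by rw [Nat.zero_div]; exact pvIsC_zero⟩
  · exact h1

-- the Stanley set is midpoint-free: a + c = 2b with all three in C forces a = b = c
lemma pvIsC_ap : ∀ b a c : Nat, pvIsC a = true → pvIsC b = true → pvIsC c = true →
    a + c = 2 * b → a = b ∧ c = b := by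
  intro b
  induction b using Nat.strong_induction_on with
  | _ b ih =>
    intro a c ha hb hc habc
    by_cases hb0 : b = 0
    · omega
    · obtain ⟨ha1, ha2⟩ := pvIsC_parts a ha
      obtain ⟨hb1, hb2⟩ := pvIsC_parts b hb
      obtain ⟨hc1, hc2⟩ := pvIsC_parts c hc
      have hdiv : a / 3 + c / 3 = 2 * (b / 3) := by omega
      have := ih (b / 3) (by omega) (a / 3) (c / 3) ha2 hb2 hc2 hdiv
      omega

lemma pvG_add (x : Nat) : pvG0 x + x = 2 * pvG1 x := by
  induction x using Nat.strong_induction_on with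
  | _ x ih =>
    by_cases hx : x = 0
    · simp [hx, pvG0, pvG1]
    · rw [pvG0, pvG1]
      simp only [hx, if_false]
      have := ih (x / 3) (by omega)
      split_ifs with h <;> omega

lemma pvG0_isC (x : Nat) : pvIsC (pvG0 x) = true := by
  induction x using Nat.strong_induction_on with
  | _ x ih =>
    by_cases hx : x = 0
    · simp [hx, pvG0, pvIsC_zero]
    · rw [pvG0]; simp only [hx, if_false]
      have hd : (if x % 3 = 2 then 0 else x % 3) ≤ 1 := by split_ifs <;> omega
      have hq := ih (x / 3) (by omega)
      by_cases hz : 3 * pvG0 (x / 3) + (if x % 3 = 2 then 0 else x % 3) = 0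
      · rw [hz]; exact pvIsC_zero
      · rw [pvIsC_pos _ hz]
        have hmod : (3 * pvG0 (x / 3) + (if x % 3 = 2 then 0 else x % 3)) % 3
            = (if x % 3 = 2 then 0 else x % 3) := by omega
        have hdiv : (3 * pvG0 (x / 3) + (if x % 3 = 2 then 0 else x % 3)) / 3
            = pvG0 (x / 3) := by omega
        rw [hmod, hdiv, hq]; simp; omega

lemma pvG1_isC (x : Nat) : pvIsC (pvG1 x) = true := by
  induction x using Nat.strong_induction_on with
  | _ x ih =>
    by_cases hx : x = 0
    · simp [hx, pvG1, pvIsC_zero]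
    · rw [pvG1]; simp only [hx, if_false]
      have hd : (if x % 3 = 2 then 1 else x % 3) ≤ 1 := by split_ifs <;> omega
      have hq := ih (x / 3) (by omega)
      by_cases hz : 3 * pvG1 (x / 3) + (if x % 3 = 2 then 1 else x % 3) = 0
      · rw [hz]; exact pvIsC_zero
      · rw [pvIsC_pos _ hz]
        have hmod : (3 * pvG1 (x / 3) + (if x % 3 = 2 then 1 else x % 3)) % 3
            = (if x % 3 = 2 then 1 else x % 3) := by omega
        have hdiv : (3 * pvG1 (x / 3) + (if x % 3 = 2 then 1 else x % 3)) / 3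
            = pvG1 (x / 3) := by omega
        rw [hmod, hdiv, hq]; simp; omega

lemma pvG1_le (x : Nat) : pvG1 x ≤ x := by
  induction x using Nat.strong_induction_on with
  | _ x ih =>
    by_cases hx : x = 0
    · simp [hx, pvG1]
    · rw [pvG1]; simp only [hx, if_false]
      have := ih (x / 3) (by omega)
      split_ifs with h <;> omega

lemma pvG0_le_pvG1 (x : Nat) : pvG0 x ≤ pvG1 x := by
  induction x using Nat.strong_induction_on with
  | _ x ih =>
    by_cases hx : x = 0
    · simp [hx, pvG0, pvG1]
    · rw [pvG0, pvG1]; simp only [hx, if_false]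
      have := ih (x / 3) (by omega)
      split_ifs with h <;> omega

lemma pvG1_lt (x : Nat) (hx : pvIsC x = false) : pvG1 x < x := by
  induction x using Nat.strong_induction_on with
  | _ x ih =>
    have hx0 : x ≠ 0 := by
      intro h; rw [h, pvIsC_zero] at hx; exact absurd hx (by simp)
    rw [pvG1]; simp only [hx0, if_false]
    by_cases h2 : x % 3 = 2
    · have := pvG1_le (x / 3)
      simp only [h2, if_true]; omega
    · cases hq : pvIsC (x / 3) with
      | true =>
        exfalso
        have hx' : pvIsC x = true := (pvIsC_iff x).mpr (Or.inr ⟨by omega, hq⟩)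
        rw [hx'] at hx; simp at hx
      | false =>
        have := ih (x / 3) (by omega) hq
        rw [if_neg h2]
        omega

lemma pvSfun_lt_pow (n : Nat) : pvSfun n < 3 ^ n := by
  induction n using Nat.strong_induction_on with
  | _ n ih =>
    by_cases hn : n = 0
    · rw [hn, pvSfun_zero]; norm_num
    · have ih' := ih (n / 2) (by omega)
      have hpow : 3 ^ (n / 2 + 1) ≤ 3 ^ n := Nat.pow_le_pow_right (by norm_num) (by omega)
      have h3 : 3 ^ (n / 2 + 1) = 3 * 3 ^ (n / 2) := by ring
      rw [pvSfun_pos n hn]; omega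

lemma pvBloop_eq : ∀ (n : Nat) (r p : Int), pvBloop n r p = r + p * (pvSfun n : Nat) := by
  intro n
  induction n using Nat.strong_induction_on with
  | _ n ih =>
    intro r p
    rw [pvBloop]
    by_cases hn : n = 0
    · simp [hn, pvSfun_zero]
    · simp only [hn, if_false]
      rw [ih (n / 2) (by omega), pvSfun_pos n hn]
      push_cast
      ring

-- the first j accepted terms
def pvSeqJ (j : Nat) : List Int := (List.range j).map (fun k => (pvSfun k : Int))

lemma pvEhValido_eq_false_iff (x : Int) (u : PySem.Set Int) :
    ∀ seq : List Int, pvEhValido x u seq = false ↔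
      ∃ a ∈ seq, PySem.Int.mod (x + a) 2 = 0 ∧
        PySem.Set.contains u (PySem.Int.floordiv (x + a) 2) = true := by
  intro seq
  induction seq with
  | nil => simp [pvEhValido]
  | cons a rest ih =>
    simp only [pvEhValido]
    split_ifs with h
    · simp only [Bool.and_eq_true, beq_iff_eq] at h
      simp only [List.mem_cons]
      exact ⟨fun _ => ⟨a, Or.inl rfl, h.1, h.2⟩, fun _ => trivial⟩
    · rw [ih]
      constructor
      · rintro ⟨a', ha', h1, h2⟩
        exact ⟨a', List.mem_cons_of_mem _ ha', h1, h2⟩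
      · rintro ⟨a', ha', h1, h2⟩
        rcases List.mem_cons.mp ha' with rfl | hm
        · exact absurd (by rw [h1, h2]; rfl) h
        · exact ⟨a', hm, h1, h2⟩

lemma pvMem_seqJ (j : Nat) (y : Int) : y ∈ pvSeqJ j ↔ ∃ k < j, (pvSfun k : Int) = y := by
  simp [pvSeqJ]

lemma pvModCast (m a : Nat) :
    PySem.Int.mod ((m : Int) + (a : Int)) 2 = (((m + a) % 2 : Nat) : Int) := by
  have h : ((m : Int) + (a : Int)) = ((m + a : Nat) : Int) := by push_cast; ring
  rw [h]
  exact_mod_cast PySem.Int.mod_natCast (m + a) 2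

lemma pvDivCast (m a : Nat) :
    PySem.Int.floordiv ((m : Int) + (a : Int)) 2 = (((m + a) / 2 : Nat) : Int) := by
  have h : ((m : Int) + (a : Int)) = ((m + a : Nat) : Int) := by push_cast; ring
  rw [h]
  exact_mod_cast PySem.Int.floordiv_natCast (m + a) 2

lemma pvSfun_mono_le (a b : Nat) (h : a ≤ b) : pvSfun a ≤ pvSfun b := by
  rcases Nat.eq_or_lt_of_le h with rfl | hlt
  · exact le_refl _
  · exact le_of_lt (pvSfun_mono b a hlt)

-- the check accepts x = m iff m is in the Stanley set, given seq/usados hold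
-- exactly the Stanley numbers < m
lemma pvCheck_iff (j m : Nat) (hm : ∀ k, pvSfun k < m ↔ k < j) :
    pvEhValido (m : Int) (pvSeqJ j) (pvSeqJ j) = pvIsC m := by
  rcases Bool.eq_false_or_eq_true (pvIsC m) with hc | hc <;> rw [hc]
  · by_contra hfalse
    simp only [Bool.not_eq_true] at hfalse
    obtain ⟨a, ha, h1, h2⟩ := (pvEhValido_eq_false_iff _ _ _).mp hfalse
    obtain ⟨k, hkj, hka⟩ := (pvMem_seqJ j a).mp ha
    rw [← hka] at h1 h2
    rw [pvModCast] at h1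
    rw [pvDivCast, PySem.Set.contains_iff] at h2
    obtain ⟨l, hlj, hlb⟩ := (pvMem_seqJ j _).mp h2
    have hl : pvSfun l = (m + pvSfun k) / 2 := by exact_mod_cast hlb
    have h1' : (m + pvSfun k) % 2 = 0 := by exact_mod_cast h1
    have hap := pvIsC_ap (pvSfun l) (pvSfun k) m (pvSfun_isC k) (pvSfun_isC l) hc (by omega)
    have hkm : pvSfun k < m := (hm k).mpr hkj
    omega
  · rw [pvEhValido_eq_false_iff]
    have hg1lt : pvG1 m < m := pvG1_lt m hc
    obtain ⟨k0, hk0⟩ := pvSfun_surj _ (pvG0_isC m)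
    obtain ⟨k1, hk1⟩ := pvSfun_surj _ (pvG1_isC m)
    have hle := pvG0_le_pvG1 m
    have hadd := pvG_add m
    have hk0m : pvSfun k0 < m := by omega
    have hk1m : pvSfun k1 < m := by omega
    refine ⟨(pvG0 m : Int), (pvMem_seqJ j _).mpr ⟨k0, (hm k0).mp hk0m, by rw [hk0]⟩, ?_, ?_⟩
    · rw [pvModCast]
      have h2 : (m + pvG0 m) % 2 = 0 := by omega
      rw [h2]; rfl
    · rw [pvDivCast]
      have hdiv : (m + pvG0 m) / 2 = pvG1 m := by omega
      rw [hdiv, PySem.Set.contains_iff]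
      exact (pvMem_seqJ j _).mpr ⟨k1, (hm k1).mp hk1m, by rw [hk1]⟩

lemma pvSeqJ_succ (j : Nat) : pvSeqJ (j + 1) = pvSeqJ j ++ [(pvSfun j : Int)] := by
  simp [pvSeqJ, List.range_succ]

lemma pvLast (j : Nat) (hj : 1 ≤ j) :
    (PySem.List.pyGet? (pvSeqJ j) (-1)).getD 0 = (pvSfun (j - 1) : Int) := by
  obtain ⟨j', rfl⟩ : ∃ j', j = j' + 1 := ⟨j - 1, by omega⟩
  rw [pvSeqJ_succ, PySem.List.pyGet?_neg_one_append_singleton]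
  simp

lemma pvLoop_inv (n : Nat) (hn : 2 ≤ n) :
    ∀ fuel j m : Nat, 1 ≤ j → j ≤ n →
    (j < n → pvSfun (j - 1) < m ∧ m ≤ pvSfun j ∧ pvSfun (n - 1) + 1 ≤ m + fuel) →
    pvLoopA (n : Int) fuel (pvSeqJ j) (pvSeqJ j) (m : Int) = (pvSfun (n - 1) : Int) := by
  intro fuel
  induction fuel with
  | zero =>
    intro j m hj1 hjn hcond
    by_cases hjn' : j < n
    · obtain ⟨h1, h2, h3⟩ := hcond hjn'
      have := pvSfun_mono_le j (n - 1) (by omega)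
      omega
    · have hj : j = n := by omega
      subst hj
      simp only [pvLoopA]
      exact pvLast j (by omega)
  | succ fuel ih =>
    intro j m hj1 hjn hcond
    simp only [pvLoopA]
    have hlen : ((pvSeqJ j).length : Int) = (j : Int) := by simp [pvSeqJ]
    by_cases hjn' : j < n
    · rw [if_pos (by rw [hlen]; exact_mod_cast hjn')]
      obtain ⟨hm1, hm2, hm3⟩ := hcond hjn'
      have hm : ∀ k, pvSfun k < m ↔ k < j := by
        intro k
        constructor
        · intro h
          by_contra hk
          have := pvSfun_mono_le j k (by omega)
          omega
        · intro hk
          have := pvSfun_mono_le k (j - 1) (by omega)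
          omega
      rw [pvCheck_iff j m hm]
      have hcast1 : ((m : Int) + 1) = ((m + 1 : Nat) : Int) := by push_cast; ring
      rcases Bool.eq_false_or_eq_true (pvIsC m) with hc | hc <;> rw [hc]
      swap
      · rw [if_neg (by simp)]
        rw [hcast1]
        apply ih j (m + 1) hj1 hjn
        intro _
        have hne : m ≠ pvSfun j := by
          intro h
          rw [h, pvSfun_isC j] at hc
          exact absurd hc (by simp)
        exact ⟨by omega, by omega, by omega⟩
      · rw [if_pos rfl]
        obtain ⟨k, hk⟩ := pvSfun_surj m hc
        have hkj : k = j := by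
          by_contra hne
          rcases Nat.lt_or_ge k j with h | h
          · have := (hm k).mpr h; omega
          · have := pvSfun_mono k j (by omega); omega
        subst hkj
        have hmem : ((m : Int)) ∉ pvSeqJ k := by
          intro hmm
          obtain ⟨l, hlj, hl⟩ := (pvMem_seqJ k _).mp hmm
          have h1 : pvSfun l < m := (hm l).mpr hlj
          have h2 : pvSfun l = m := by exact_mod_cast hl
          omega
        rw [PySem.Set.add_of_not_mem hmem]
        have hseq : pvSeqJ k ++ [(m : Int)] = pvSeqJ (k + 1) := by rw [pvSeqJ_succ, hk]
        rw [hseq, hcast1]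
        apply ih (k + 1) (m + 1) (by omega) (by omega)
        intro _
        refine ⟨by simpa using by omega, ?_, by omega⟩
        have := pvSfun_mono (k + 1) k (by omega)
        omega
    · rw [if_neg (by rw [hlen]; exact_mod_cast hjn')]
      have hj : j = n := by omega
      subst hj
      exact pvLast j (by omega)

-- ===== VERDICT (by name: the statement is the Claim_ definition above) =====
theorem anti_progressao_n_esimo_spec : Claim_equal_anti_progressao_n_esimo := by
  intro N _
  unfold Spec_anti_progressao_n_esimo anti_progressao_n_esimo anti_progressao_n_esimo_alt
  by_cases hN : N ≤ 1
  · rw [if_pos hN]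
    obtain ⟨f, hf⟩ : ∃ f, 3 ^ N.toNat = f + 1 :=
      ⟨3 ^ N.toNat - 1, by have : 0 < 3 ^ N.toNat := Nat.pow_pos (by norm_num); omega⟩
    rw [hf]
    simp only [pvLoopA]
    rw [if_neg (by simp; omega)]
    decide
  · rw [if_neg hN]
    obtain ⟨n, hn2, rfl⟩ : ∃ n : Nat, 2 ≤ n ∧ N = (n : Int) := ⟨N.toNat, by omega, by omega⟩
    have htn : ((n : Int)).toNat = n := by omega
    have ht : ((n : Int) - 1).toNat = n - 1 := by omega
    have h0 : PySem.Set.ofList [(0 : Int)] = [(0 : Int)] :=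
      PySem.Set.ofList_eq_self_of_nodup [(0 : Int)] (List.nodup_singleton 0)
    have h1 : [(0 : Int)] = pvSeqJ 1 := by simp [pvSeqJ, pvSfun_zero]
    have hS1 : pvSfun 1 = 1 := by
      rw [pvSfun_pos 1 (by omega), pvSfun_zero]
    have hfuel : pvSfun (n - 1) + 1 ≤ 1 + 3 ^ n := by
      have hlt := pvSfun_lt_pow (n - 1)
      have hle : 3 ^ (n - 1) ≤ 3 ^ n := Nat.pow_le_pow_right (by norm_num) (by omega)
      omega
    rw [htn, ht, h0, h1, pvBloop_eq]
    rw [show ((1 : Int)) = ((1 : Nat) : Int) by norm_num]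
    rw [pvLoop_inv n hn2 (3 ^ n) 1 1 (by omega) (by omega)
      (fun _ => ⟨by simp [pvSfun_zero], by rw [hS1], hfuel⟩)]
    push_cast
    ring
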